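-- pv_equiv track=rewrite | github.com/Nghia03092004/nghia03092004.github.io | project_euler_unified/problem_263/solution.py | is_practical
-- ===== SOURCE A (Python) =====
-- def is_practical(n):
--     """Check if n is a practical number using Stewart's criterion."""
--     if n <= 0: return False
--     if n == 1: return True
--     if n % 2 != 0: return False
--     factors = []
--     temp = n
--     d = 2
--     while d * d <= temp:
--         if temp % d == 0:
--             exp = 0
--             while temp % d == 0:
--                 temp //= d
--                 exp += 1
--             factors.append((d, exp))
--         d += 1
--     if temp > 1:
--         factors.append((temp, 1))
--     factors.sort()
--     if factors[0][0] != 2: return False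
--     sigma_product = 1
--     for i, (p, a) in enumerate(factors):
--         if i == 0:
--             sigma_product = (p ** (a + 1) - 1) // (p - 1)
--         else:
--             if p > 1 + sigma_product: return False
--             sigma_product *= (p ** (a + 1) - 1) // (p - 1)
--     return True
-- ===== SOURCE B (Python) =====
-- def is_practical(n):
--     """Check if n is a practical number (Stewart's criterion, fused single pass)."""
--     if n <= 0:
--         return False
--     if n == 1:
--         return True
--     if n % 2:
--         return False
--     m = n
--     e = 0
--     while m % 2 == 0:
--         m //= 2
--         e += 1
--     sigma = 2 ** (e + 1) - 1
--     d = 3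
--     while d * d <= m:
--         if m % d == 0:
--             if d > 1 + sigma:
--                 return False
--             e = 0
--             while m % d == 0:
--                 m //= d
--                 e += 1
--             sigma *= (d ** (e + 1) - 1) // (d - 1)
--         d += 2
--     if m > 1 and m > 1 + sigma:
--         return False
--     return True
-- ===== Notes on version B (the rewrite author's own statement) =====
-- stated objective: alternative
-- what changed: B fuses Stewart's check into the trial-division loop itself: it strips the factor 2 first, then tries only odd candidates and checks p <= 1 + sigma on the fly, so A's factor list, sort and enumerate pass disappear.
import Mathlib
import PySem

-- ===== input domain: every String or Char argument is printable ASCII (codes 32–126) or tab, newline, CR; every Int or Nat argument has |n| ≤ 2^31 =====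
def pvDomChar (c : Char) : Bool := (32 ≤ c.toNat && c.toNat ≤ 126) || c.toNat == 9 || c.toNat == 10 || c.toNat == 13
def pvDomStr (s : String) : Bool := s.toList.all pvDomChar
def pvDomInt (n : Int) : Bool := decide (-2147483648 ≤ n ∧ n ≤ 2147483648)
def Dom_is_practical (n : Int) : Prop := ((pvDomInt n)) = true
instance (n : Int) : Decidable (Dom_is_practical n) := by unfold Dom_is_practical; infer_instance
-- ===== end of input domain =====

-- B fuses Stewart's check into the trial-division loop itself (no factor list, no
-- sort, no enumerate; strips 2 first, then tries odd candidates only); same value.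

-- ===== PORT A =====

-- shared helper: the inner `while temp % d == 0: temp //= d; exp += 1` loop,
-- textually identical in both Pythons; returns (exp, residual). The fuel argument
-- (always passed as m, enough for every run) only makes the recursion structural;
-- Python's loop terminates because m shrinks whenever d ≥ 2 divides it.
def stripFacF : Nat → Nat → Nat → Nat × Nat
  | 0, m, _ => (0, m)
  | fuel + 1, m, d =>
    if 2 ≤ d ∧ 0 < m ∧ m % d = 0 then
      let r := stripFacF fuel (m / d) d
      (r.1 + 1, r.2)
    else (0, m)

-- A's outer trial-division loop: the collected (p, exp) factors and the final
-- residual. Fuel (passed as temp + 1) and the `2 ≤ d` conjunct are totality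
-- devices only; A runs the loop with d ≥ 2 and at most temp iterations.
def factorLoopF : Nat → Nat → Nat → List (Nat × Nat) × Nat
  | 0, temp, _ => ([], temp)
  | fuel + 1, temp, d =>
    if 2 ≤ d ∧ d * d ≤ temp then
      if temp % d = 0 then
        let s := stripFacF temp temp d
        let r := factorLoopF fuel s.2 (d + 1)
        ((d, s.1) :: r.1, r.2)
      else factorLoopF fuel temp (d + 1)
    else ([], temp)

-- A's final `for i, (p, a) in enumerate(factors)` loop after the i = 0 step …
def afold : List (Nat × Nat) → Nat → Bool
  | [], _ => true
  | (p, a) :: rest, sigma =>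
    if 1 + sigma < p then false
    else afold rest (sigma * ((p ^ (a + 1) - 1) / (p - 1)))

-- … and its i = 0 step together with the `factors[0][0] != 2` test
def afold0 : List (Nat × Nat) → Bool
  | [] => false   -- unreachable for n ≥ 2 (Python would raise IndexError on factors[0])
  | (p, a) :: rest => if p ≠ 2 then false else afold rest ((p ^ (a + 1) - 1) / (p - 1))

def is_practical (n : Int) : Bool :=
  if n ≤ 0 then false
  else if n = 1 then true
  else if PySem.Int.mod n 2 ≠ 0 then false
  else
    -- factors.sort(): the bases are distinct, so Python's tuple sort is the sort by first component
    afold0 (PySem.List.sorted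
      ((factorLoopF (n.toNat + 1) n.toNat 2).1 ++
        (if 1 < (factorLoopF (n.toNat + 1) n.toNat 2).2
         then [((factorLoopF (n.toNat + 1) n.toNat 2).2, 1)] else []))
      (fun x => x.1) false)

-- ===== PORT B =====

-- B's fused loop: factorize and check Stewart's condition in one pass, odd d only.
-- Fuel (passed as m + 1) and `2 ≤ d` are again totality devices only.
def bloopF : Nat → Nat → Nat → Nat → Bool
  | 0, m, _, sigma => if 1 < m then decide (m ≤ 1 + sigma) else true
  | fuel + 1, m, d, sigma =>
    if 2 ≤ d ∧ d * d ≤ m then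
      if m % d = 0 then
        if 1 + sigma < d then false
        else
          let s := stripFacF m m d
          bloopF fuel s.2 (d + 2) (sigma * ((d ^ (s.1 + 1) - 1) / (d - 1)))
      else bloopF fuel m (d + 2) sigma
    else if 1 < m then decide (m ≤ 1 + sigma) else true

def is_practical_alt (n : Int) : Bool :=
  if n ≤ 0 then false
  else if n = 1 then true
  else if PySem.Int.mod n 2 ≠ 0 then false
  else
    bloopF ((stripFacF n.toNat n.toNat 2).2 + 1) (stripFacF n.toNat n.toNat 2).2 3
      (2 ^ ((stripFacF n.toNat n.toNat 2).1 + 1) - 1)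

-- ===== PRECONDITION & SPEC =====
def Spec_is_practical (n : Int) (out : Bool) : Prop := out = is_practical_alt n
instance (n : Int) (out : Bool) : Decidable (Spec_is_practical n out) := by unfold Spec_is_practical; infer_instance

-- ===== CLAIM (what is proved, stated in full; the proofs are below) =====
def Claim_equal_is_practical : Prop := ∀ (n : Int), Dom_is_practical n → Spec_is_practical n (is_practical n)

-- ===== LEMMAS AND PROOFS =====

-- fuel-free well-founded twins of the three loops, used only by the proofs
def stripFac (m d : Nat) : Nat × Nat :=
  if h : 2 ≤ d ∧ 0 < m ∧ m % d = 0 then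
    let r := stripFac (m / d) d
    (r.1 + 1, r.2)
  else (0, m)
  termination_by m
  decreasing_by exact Nat.div_lt_self h.2.1 (by omega)

lemma stripFac_snd_le (d : Nat) : ∀ m, (stripFac m d).2 ≤ m := by
  intro m
  induction m using Nat.strong_induction_on with
  | _ m ih =>
    rw [stripFac]
    split
    · next h =>
      exact le_trans (ih _ (Nat.div_lt_self h.2.1 (by omega))) (Nat.div_le_self _ _)
    · exact le_refl m

lemma stripFac_snd_lt (m d : Nat) (h : 2 ≤ d ∧ 0 < m ∧ m % d = 0) : (stripFac m d).2 < m := by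
  rw [stripFac, dif_pos h]
  exact lt_of_le_of_lt (stripFac_snd_le d _) (Nat.div_lt_self h.2.1 (by omega))

def factorLoop (temp d : Nat) : List (Nat × Nat) × Nat :=
  if h : 2 ≤ d ∧ d * d ≤ temp then
    if h2 : temp % d = 0 then
      let s := stripFac temp d
      let r := factorLoop s.2 (d + 1)
      ((d, s.1) :: r.1, r.2)
    else factorLoop temp (d + 1)
  else ([], temp)
  termination_by (temp, temp + 1 - d)
  decreasing_by
  · exact Prod.Lex.left _ _ (stripFac_snd_lt temp d ⟨h.1, by have := le_trans (Nat.le_mul_of_pos_left d (by omega)) h.2; omega, h2⟩)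
  · have hdt : d ≤ temp := le_trans (Nat.le_mul_of_pos_left d (by omega)) h.2
    exact Prod.Lex.right temp (by omega)

def bloop (m d sigma : Nat) : Bool :=
  if h : 2 ≤ d ∧ d * d ≤ m then
    if h2 : m % d = 0 then
      if 1 + sigma < d then false
      else
        let s := stripFac m d
        bloop s.2 (d + 2) (sigma * ((d ^ (s.1 + 1) - 1) / (d - 1)))
    else bloop m (d + 2) sigma
  else if 1 < m then decide (m ≤ 1 + sigma) else true
  termination_by (m, m + 1 - d)
  decreasing_by
  · exact Prod.Lex.left _ _ (stripFac_snd_lt m d ⟨h.1, by have := le_trans (Nat.le_mul_of_pos_left d (by omega)) h.2; omega, h2⟩)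
  · have hdt : d ≤ m := le_trans (Nat.le_mul_of_pos_left d (by omega)) h.2
    exact Prod.Lex.right m (by omega)

-- the fuel versions agree with their twins whenever the fuel covers the run
lemma stripFacF_eq : ∀ fuel m d, m ≤ fuel → stripFacF fuel m d = stripFac m d := by
  intro fuel
  induction fuel with
  | zero =>
    intro m d h
    have hm : m = 0 := by omega
    subst hm
    rw [stripFacF, stripFac, dif_neg (by omega)]
  | succ fuel ih =>
    intro m d h
    by_cases hc : 2 ≤ d ∧ 0 < m ∧ m % d = 0
    · rw [stripFacF, if_pos hc, stripFac, dif_pos hc,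
          ih (m / d) d (by have := Nat.div_lt_self hc.2.1 (by omega : 1 < d); omega)]
    · rw [stripFacF, if_neg hc, stripFac, dif_neg hc]

lemma sq_guard_imp (temp d : Nat) (h : 2 ≤ d ∧ d * d ≤ temp) : d ≤ temp :=
  le_trans (Nat.le_mul_of_pos_left d (by omega)) h.2

lemma factorLoopF_eq : ∀ fuel temp d, temp + 1 ≤ fuel + d →
    factorLoopF fuel temp d = factorLoop temp d := by
  intro fuel
  induction fuel with
  | zero =>
    intro temp d h
    rw [factorLoopF, factorLoop, dif_neg (fun hc => by have := sq_guard_imp temp d hc; omega)]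
  | succ fuel ih =>
    intro temp d h
    by_cases hc : 2 ≤ d ∧ d * d ≤ temp
    · have hpos : 0 < temp := by have := sq_guard_imp temp d hc; omega
      by_cases h2 : temp % d = 0
      · have hlt := stripFac_snd_lt temp d ⟨hc.1, hpos, h2⟩
        rw [factorLoopF, if_pos hc, if_pos h2, factorLoop, dif_pos hc, dif_pos h2]
        simp only [stripFacF_eq temp temp d (le_refl _),
          ih (stripFac temp d).2 (d + 1) (by omega)]
      · rw [factorLoopF, if_pos hc, if_neg h2, factorLoop, dif_pos hc, dif_neg h2,
            ih temp (d + 1) (by omega)]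
    · rw [factorLoopF, if_neg hc, factorLoop, dif_neg hc]

lemma bloopF_eq : ∀ fuel m d sigma, m + 1 ≤ fuel + d →
    bloopF fuel m d sigma = bloop m d sigma := by
  intro fuel
  induction fuel with
  | zero =>
    intro m d sigma h
    rw [bloopF, bloop, dif_neg (fun hc => by have := sq_guard_imp m d hc; omega)]
  | succ fuel ih =>
    intro m d sigma h
    by_cases hc : 2 ≤ d ∧ d * d ≤ m
    · have hpos : 0 < m := by have := sq_guard_imp m d hc; omega
      by_cases h2 : m % d = 0
      · have hlt := stripFac_snd_lt m d ⟨hc.1, hpos, h2⟩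
        rw [bloopF, if_pos hc, if_pos h2, bloop, dif_pos hc, dif_pos h2]
        by_cases hchk : 1 + sigma < d
        · rw [if_pos hchk, if_pos hchk]
        · rw [if_neg hchk, if_neg hchk]
          simp only [stripFacF_eq m m d (le_refl _)]
          exact ih (stripFac m d).2 (d + 2) _ (by omega)
      · rw [bloopF, if_pos hc, if_neg h2, bloop, dif_pos hc, dif_neg h2,
            ih m (d + 2) sigma (by omega)]
    · rw [bloopF, if_neg hc, bloop, dif_neg hc]


lemma stripFac_spec (d : Nat) (hd : 2 ≤ d) : ∀ m, 0 < m →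
    0 < (stripFac m d).2 ∧ (stripFac m d).2 ∣ m ∧ ¬ d ∣ (stripFac m d).2 := by
  intro m
  induction m using Nat.strong_induction_on with
  | _ m ih =>
    intro hm
    rw [stripFac]
    split
    · next h =>
      have hdiv : d ∣ m := Nat.dvd_of_mod_eq_zero h.2.2
      have hmd : 0 < m / d := Nat.div_pos (Nat.le_of_dvd hm hdiv) (by omega)
      obtain ⟨h1, h2, h3⟩ := ih (m / d) (Nat.div_lt_self hm (by omega)) hmd
      exact ⟨h1, h2.trans (Nat.div_dvd_of_dvd hdiv), h3⟩
    · next h =>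
      refine ⟨hm, dvd_refl m, fun hdvd => h ⟨hd, hm, Nat.mod_eq_zero_of_dvd hdvd⟩⟩

-- the list A's final loop folds over: collected factors plus the `if temp > 1` tail
def fullList (temp d : Nat) : List (Nat × Nat) :=
  (factorLoop temp d).1 ++ (if 1 < (factorLoop temp d).2 then [((factorLoop temp d).2, 1)] else [])

lemma fullList_base (temp d : Nat) (h : ¬ (2 ≤ d ∧ d * d ≤ temp)) :
    fullList temp d = if 1 < temp then [(temp, 1)] else [] := by
  unfold fullList
  rw [factorLoop, dif_neg h]
  simp

lemma fullList_step (temp d : Nat) (h : 2 ≤ d ∧ d * d ≤ temp) (h2 : temp % d = 0) :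
    fullList temp d = (d, (stripFac temp d).1) :: fullList (stripFac temp d).2 (d + 1) := by
  unfold fullList
  rw [factorLoop, dif_pos h, dif_pos h2]
  simp

lemma fullList_skip (temp d : Nat) (h : 2 ≤ d ∧ d * d ≤ temp) (h2 : ¬ temp % d = 0) :
    fullList temp d = fullList temp (d + 1) := by
  unfold fullList
  rw [factorLoop, dif_pos h, dif_neg h2]

lemma fullList_even_skip (t e : Nat) (ht : ¬ 2 ∣ t) (he : 2 ∣ e) (he2 : 2 ≤ e) :
    fullList t e = fullList t (e + 1) := by
  by_cases h : e * e ≤ t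
  · refine fullList_skip t e ⟨he2, h⟩ (fun hm => ht (dvd_trans he (Nat.dvd_of_mod_eq_zero hm)))
  · have h' : ¬ (e + 1) * (e + 1) ≤ t := by
      intro hc
      exact h (le_trans (Nat.mul_le_mul (Nat.le_succ e) (Nat.le_succ e)) hc)
    rw [fullList_base t e (by omega), fullList_base t (e + 1) (by omega)]

lemma factorLoop_struct : ∀ temp d, 2 ≤ d → 0 < temp → (∀ k, 2 ≤ k → k < d → ¬ k ∣ temp) →
    (∀ x ∈ fullList temp d, d ≤ x.1) ∧ (fullList temp d).Pairwise (fun a b => a.1 < b.1) := by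
  intro temp d
  induction temp, d using factorLoop.induct with
  | case1 temp d h h2 s ih =>
    intro hd ht hinv
    obtain ⟨hpos, hdvd, hnd⟩ := stripFac_spec d hd temp ht
    have hinv' : ∀ k, 2 ≤ k → k < d + 1 → ¬ k ∣ (stripFac temp d).2 := by
      intro k hk2 hkd hkdvd
      rcases Nat.lt_or_ge k d with hlt | hge
      · exact hinv k hk2 hlt (hkdvd.trans hdvd)
      · have hk : k = d := by omega
        subst hk; exact hnd hkdvd
    obtain ⟨hall, hpw⟩ := ih (by omega) hpos hinv'
    rw [fullList_step temp d h h2]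
    constructor
    · intro x hx
      rcases List.mem_cons.1 hx with rfl | hx
      · exact le_refl d
      · exact le_trans (by omega) (hall x hx)
    · exact List.Pairwise.cons (fun y hy => lt_of_lt_of_le (by omega) (hall y hy)) hpw
  | case2 temp d h h2 ih =>
    intro hd ht hinv
    rw [fullList_skip temp d h h2]
    have hinv' : ∀ k, 2 ≤ k → k < d + 1 → ¬ k ∣ temp := by
      intro k hk2 hkd hkdvd
      rcases Nat.lt_or_ge k d with hlt | hge
      · exact hinv k hk2 hlt hkdvd
      · have hk : k = d := by omega
        subst hk; exact h2 (Nat.mod_eq_zero_of_dvd hkdvd)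
    obtain ⟨hall, hpw⟩ := ih (by omega) ht hinv'
    exact ⟨fun x hx => le_trans (by omega) (hall x hx), hpw⟩
  | case3 temp d h =>
    intro hd ht hinv
    rw [fullList_base temp d h]
    by_cases h1 : 1 < temp
    · rw [if_pos h1]
      refine ⟨?_, List.pairwise_singleton _ _⟩
      intro x hx
      rcases List.mem_singleton.1 hx with rfl
      by_contra hc
      exact hinv temp (by omega) (by simp at hc; omega) (dvd_refl temp)
    · rw [if_neg h1]
      exact ⟨by simp, List.Pairwise.nil⟩

lemma fuse : ∀ temp d sigma, 3 ≤ d → ¬ 2 ∣ d → ¬ 2 ∣ temp → 0 < temp →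
    (∀ k, 2 ≤ k → k < d → ¬ k ∣ temp) →
    afold (fullList temp d) sigma = bloop temp d sigma := by
  intro temp d sigma
  induction temp, d, sigma using bloop.induct with
  | case1 m d sigma h h2 hchk =>
    intro hd hdo hto ht hinv
    rw [fullList_step m d h h2, afold, if_pos hchk, bloop, dif_pos h, dif_pos h2, if_pos hchk]
  | case2 m d sigma h h2 hchk s ih =>
    intro hd hdo hto ht hinv
    obtain ⟨hpos, hdvd, hnd⟩ := stripFac_spec d (by omega) m ht
    have hto' : ¬ 2 ∣ (stripFac m d).2 := fun hc => hto (hc.trans hdvd)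
    have hinv' : ∀ k, 2 ≤ k → k < d + 2 → ¬ k ∣ (stripFac m d).2 := by
      intro k hk2 hkd hkdvd
      rcases Nat.lt_or_ge k d with hlt | hge
      · exact hinv k hk2 hlt (hkdvd.trans hdvd)
      · rcases Nat.lt_or_ge k (d + 1) with hk | hk
        · have hkk : k = d := by omega
          subst hkk; exact hnd hkdvd
        · have hkk : k = d + 1 := by omega
          subst hkk
          exact hto' (dvd_trans (by omega) hkdvd)
    rw [fullList_step m d h h2, afold, if_neg hchk,
        fullList_even_skip (stripFac m d).2 (d + 1) hto' (by omega) (by omega),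
        bloop, dif_pos h, dif_pos h2, if_neg hchk]
    exact ih (by omega) (by omega) hto' hpos hinv'
  | case3 m d sigma h h2 ih =>
    intro hd hdo hto ht hinv
    have hinv' : ∀ k, 2 ≤ k → k < d + 2 → ¬ k ∣ m := by
      intro k hk2 hkd hkdvd
      rcases Nat.lt_or_ge k d with hlt | hge
      · exact hinv k hk2 hlt hkdvd
      · rcases Nat.lt_or_ge k (d + 1) with hk | hk
        · have hkk : k = d := by omega
          subst hkk; exact h2 (Nat.mod_eq_zero_of_dvd hkdvd)
        · have hkk : k = d + 1 := by omega
          subst hkk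
          exact hto (dvd_trans (by omega) hkdvd)
    rw [fullList_skip m d h h2,
        fullList_even_skip m (d + 1) hto (by omega) (by omega),
        bloop, dif_pos h, dif_neg h2]
    exact ih (by omega) (by omega) hto ht hinv'
  | case4 m d sigma h h1 =>
    intro hd hdo hto ht hinv
    rw [fullList_base m d h, bloop, dif_neg h, if_pos h1, if_pos h1, afold]
    by_cases hc : 1 + sigma < m
    · rw [if_pos hc]
      exact (decide_eq_false (by omega)).symm
    · rw [if_neg hc, afold]
      exact (decide_eq_true (by omega)).symm
  | case5 m d sigma h h1 =>
    intro hd hdo hto ht hinv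
    rw [fullList_base m d h, bloop, dif_neg h, if_neg h1, if_neg h1, afold]

-- A folds over fullList N 2; B strips 2 first: for even N ≥ 2 these coincide
lemma fullList_two (N : Nat) (h2 : 2 ≤ N) (hdvd : 2 ∣ N) :
    fullList N 2 = (2, (stripFac N 2).1) :: fullList (stripFac N 2).2 3 := by
  rcases Nat.lt_or_ge N 4 with h4 | h4
  · have hN : N = 2 := by omega
    subst hN
    have h12 : stripFac 1 2 = (0, 1) := by
      rw [stripFac, dif_neg (by norm_num)]
    have hs : stripFac 2 2 = (1, 1) := by
      rw [stripFac, dif_pos (by norm_num)]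
      norm_num [h12]
    rw [hs, fullList_base 2 2 (by norm_num), fullList_base 1 3 (by norm_num)]
    norm_num
  · exact fullList_step N 2 ⟨le_refl 2, by omega⟩ (by omega)

-- ===== VERDICT (by name: the statement is the Claim_ definition above) =====
theorem is_practical_spec : Claim_equal_is_practical := by
  unfold Claim_equal_is_practical
  intro n _
  unfold Spec_is_practical
  rw [is_practical, is_practical_alt]
  by_cases h0 : n ≤ 0
  · rw [if_pos h0, if_pos h0]
  rw [if_neg h0, if_neg h0]
  by_cases h1 : n = 1
  · rw [if_pos h1, if_pos h1]
  rw [if_neg h1, if_neg h1]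
  by_cases h2 : PySem.Int.mod n 2 = 0
  swap
  · rw [if_pos h2, if_pos h2]
  rw [if_neg (not_not_intro h2), if_neg (not_not_intro h2),
      stripFacF_eq n.toNat n.toNat 2 (le_refl _),
      factorLoopF_eq (n.toNat + 1) n.toNat 2 (by omega),
      bloopF_eq ((stripFac n.toNat 2).2 + 1) (stripFac n.toNat 2).2 3 _ (by omega)]
  have hdvdI : (2 : Int) ∣ n := (PySem.Int.mod_eq_zero_iff_dvd n 2).1 h2
  have hn2 : 2 ≤ n.toNat := by omega
  have hdvdN : 2 ∣ n.toNat := by omega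
  obtain ⟨hpos, hdvd, hnd⟩ := stripFac_spec 2 (le_refl 2) n.toNat (by omega)
  have hinv3 : ∀ k, 2 ≤ k → k < 3 → ¬ k ∣ (stripFac n.toNat 2).2 := by
    intro k hk2 hk3 hkdvd
    have hk : k = 2 := by omega
    subst hk; exact hnd hkdvd
  have key := fullList_two n.toNat hn2 hdvdN
  obtain ⟨hall, hpw0⟩ := factorLoop_struct (stripFac n.toNat 2).2 3 (by omega) hpos hinv3
  have hpw : (fullList n.toNat 2).Pairwise (fun a b : Nat × Nat => a.1 < b.1) := by
    rw [key]
    exact List.Pairwise.cons (fun y hy => lt_of_lt_of_le (by omega) (hall y hy)) hpw0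
  have hflist : (factorLoop n.toNat 2).1 ++
      (if 1 < (factorLoop n.toNat 2).2 then [((factorLoop n.toNat 2).2, 1)] else [])
      = fullList n.toNat 2 := rfl
  have hsorted : PySem.List.sorted (fullList n.toNat 2) (fun x : Nat × Nat => x.1) false
      = fullList n.toNat 2 :=
    PySem.List.sorted_eq_of_perm_of_pairwise_lt _ _ (fun x : Nat × Nat => x.1) (List.Perm.refl _) hpw
  rw [hflist, hsorted, key, afold0, if_neg (by simp)]
  have hdiv1 : (2 ^ ((stripFac n.toNat 2).1 + 1) - 1) / (2 - 1)
      = 2 ^ ((stripFac n.toNat 2).1 + 1) - 1 := by norm_num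
  rw [hdiv1]
  exact fuse (stripFac n.toNat 2).2 3 _ (le_refl 3) (by omega) hnd hpos hinv3
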